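-- pv_equiv track=rewrite | github.com/Shogaan/VeryHotKeys | profile_logic.py | generate_profile_name
-- ===== SOURCE A (Python) =====
-- def generate_profile_name(dictionary):
--     keys = dictionary.keys()
--
--     default = "Profile "
--     a = 0
--
--     while True:
--         if default + str(a) not in keys:
--             return default + str(a)
--         else:
--             a += 1
-- ===== SOURCE B (Python) =====
-- def generate_profile_name(dictionary):
--     prefix = "Profile "
--     n = len(dictionary)
--     # candidate names "Profile 0" .. "Profile n": at most n keys exist, so one is free
--     names = [prefix + str(i) for i in range(n + 1)]
--     index = {name: i for i, name in enumerate(names)}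
--     present = [False] * (n + 1)
--     for key in dictionary:
--         i = index.get(key)
--         if i is not None:
--             present[i] = True
--     free = [i for i in range(n + 1) if not present[i]]
--     return names[free[0]]
-- ===== Notes on version B (the rewrite author's own statement) =====
-- stated objective: alternative
-- what changed: A probes candidate names 'Profile 0','Profile 1',... one by one against the dict until one is missing; B instead precomputes the n+1 candidate names, marks which of them occur in a single pass over the keys via a name-to-index dictionary, and returns the first unmarked candidate.
import Mathlib
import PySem

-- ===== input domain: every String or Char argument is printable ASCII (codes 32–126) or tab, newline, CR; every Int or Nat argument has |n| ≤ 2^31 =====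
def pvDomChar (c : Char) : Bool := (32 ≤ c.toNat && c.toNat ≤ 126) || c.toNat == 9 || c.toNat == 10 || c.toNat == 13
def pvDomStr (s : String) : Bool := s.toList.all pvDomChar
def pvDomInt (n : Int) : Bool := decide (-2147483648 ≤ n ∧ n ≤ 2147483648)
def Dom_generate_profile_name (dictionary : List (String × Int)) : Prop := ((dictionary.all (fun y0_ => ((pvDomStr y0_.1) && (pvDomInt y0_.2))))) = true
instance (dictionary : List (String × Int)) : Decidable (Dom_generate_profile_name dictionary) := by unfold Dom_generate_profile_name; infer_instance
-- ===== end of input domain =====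

-- B replaces A's try-candidates-in-order loop by a precomputed candidate table ("Profile 0".."Profile n"),
-- one marking pass over the keys through a name→index dict, and a scan for the first unmarked slot (alternative decomposition, same cost).


-- ===== PORT A =====
-- the 'while True' loop; fuel |dict|+1 is proved sufficient below (pigeonhole), the fuel-0 branch is unreachable
def pvGenLoop (keys : List String) : Nat → Int → String
  | 0, a => "Profile " ++ PySem.Int.toStr a
  | fuel + 1, a =>
    if ("Profile " ++ PySem.Int.toStr a) ∈ keys then pvGenLoop keys fuel (a + 1)
    else "Profile " ++ PySem.Int.toStr a

def generate_profile_name (dictionary : List (String × Int)) : String :=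
  pvGenLoop (dictionary.map (·.1)) (dictionary.length + 1) 0

-- ===== PORT B =====
def generate_profile_name_alt (dictionary : List (String × Int)) : String :=
  let pfx := "Profile "
  let n := dictionary.length
  -- names = [prefix + str(i) for i in range(n + 1)]
  let names := (PySem.List.pyRange 0 ((n : Int) + 1) 1).map (fun i => pfx ++ PySem.Int.toStr i)
  -- index = {name: i for i, name in enumerate(names)}
  let index : PySem.Dict String Int :=
    PySem.Dict.ofList ((PySem.List.enumerate names).map (fun p => (p.2, p.1)))
  -- present = [False] * (n + 1); for key in dictionary: i = index.get(key); if i is not None: present[i] = True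
  let present := dictionary.foldl (fun pr kv =>
      match index.get? kv.1 with
      | some i => PySem.List.pySetD pr i true
      | none => pr) (List.replicate (n + 1) false)
  -- free = [i for i in range(n + 1) if not present[i]]
  let free := (PySem.List.pyRange 0 ((n : Int) + 1) 1).filter
      (fun i => !(PySem.List.pyGetD present i false))
  -- return names[free[0]]  (free is provably nonempty; the none branch only makes the port total)
  match PySem.List.pyGet? free 0 with
  | some i => PySem.List.pyGetD names i pfx
  | none => pfx

-- ===== PRECONDITION & SPEC =====
def Spec_generate_profile_name (dictionary : List (String × Int)) (out : String) : Prop := out = generate_profile_name_alt dictionary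
instance (dictionary : List (String × Int)) (out : String) : Decidable (Spec_generate_profile_name dictionary out) := by unfold Spec_generate_profile_name; infer_instance

-- ===== CLAIM (what is proved, stated in full; the proofs are below) =====
def Claim_equal_generate_profile_name : Prop := ∀ (dictionary : List (String × Int)), Dom_generate_profile_name dictionary → Spec_generate_profile_name dictionary (generate_profile_name dictionary)

-- ===== LEMMAS AND PROOFS =====

def pvDigits (n : Nat) : List Char :=
  if n < 10 then [Nat.digitChar n]
  else pvDigits (n / 10) ++ [Nat.digitChar (n % 10)]
decreasing_by exact Nat.div_lt_self (by omega) (by omega)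

def pvVal (ds : List Char) : Nat := ds.foldl (fun a c => 10 * a + (c.toNat - 48)) 0

theorem pv_toDigitsCore_eq (f : Nat) : ∀ (n : Nat) (ds : List Char), n < 10 ^ (f + 1) →
    Nat.toDigitsCore 10 (f + 1) n ds = pvDigits n ++ ds := by
  induction f with
  | zero =>
    intro n ds h
    replace h : n < 10 := by simpa using h
    rw [Nat.toDigitsCore]
    have h0 : n / 10 = 0 := Nat.div_eq_of_lt h
    simp only [h0, reduceIte]
    rw [pvDigits]
    simp [h, Nat.mod_eq_of_lt h]
  | succ f ih =>
    intro n ds h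
    rw [Nat.toDigitsCore]
    by_cases h10 : n < 10
    · have h0 : n / 10 = 0 := Nat.div_eq_of_lt h10
      simp only [h0, reduceIte]
      rw [pvDigits]
      simp [h10, Nat.mod_eq_of_lt h10]
    · have h0 : ¬ (n / 10 = 0) := by
        intro hc; exact h10 (Nat.lt_of_div_eq_zero (by omega) hc)
      have hlt : n / 10 < 10 ^ (f + 1) := by
        rw [Nat.div_lt_iff_lt_mul (by omega)]
        calc n < 10 ^ (f + 1 + 1) := h
        _ = 10 ^ (f + 1) * 10 := by ring
      simp only [h0, if_false]
      rw [ih (n / 10) _ hlt]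
      conv_rhs => rw [pvDigits]
      simp [h10]
theorem pv_toDigits_eq (n : Nat) : Nat.toDigits 10 n = pvDigits n := by
  have : n < 10 ^ (n + 1) := lt_of_lt_of_le (Nat.lt_pow_self (by omega)) (Nat.pow_le_pow_right (by omega) (by omega))
  simpa using pv_toDigitsCore_eq n n [] this
theorem pv_digitChar_toNat (m : Nat) (h : m < 10) : (Nat.digitChar m).toNat = 48 + m := by
  interval_cases m <;> rfl
theorem pvVal_digits (n : Nat) : pvVal (pvDigits n) = n := by
  induction n using Nat.strong_induction_on with
  | _ n ih =>
    rw [pvDigits]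
    by_cases h : n < 10
    · rw [if_pos h]
      simp [pvVal, pv_digitChar_toNat n h]
    · simp only [h, if_false]
      have : pvVal (pvDigits (n / 10) ++ [Nat.digitChar (n % 10)]) =
          10 * pvVal (pvDigits (n / 10)) + ((Nat.digitChar (n % 10)).toNat - 48) := by
        simp [pvVal, List.foldl_append]
      rw [this, ih (n / 10) (Nat.div_lt_self (by omega) (by omega)),
        pv_digitChar_toNat _ (Nat.mod_lt _ (by omega))]
      omega

def pvName (i : Int) : String := "Profile " ++ PySem.Int.toStr i

theorem pv_toChars_nat (i : Nat) : PySem.Int.toChars (i : Int) = pvDigits i := by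
  simp [PySem.Int.toChars, pv_toDigits_eq]

theorem pvName_inj (i j : Nat) (h : pvName (i : Int) = pvName (j : Int)) : i = j := by
  have h2 := congrArg String.toList h
  simp only [pvName, String.toList_append] at h2
  have h3 : (PySem.Int.toStr (i : Int)).toList = (PySem.Int.toStr (j : Int)).toList :=
    List.append_cancel_left h2
  rw [PySem.Int.toList_toStr, PySem.Int.toList_toStr, pv_toChars_nat, pv_toChars_nat] at h3
  have := congrArg pvVal h3
  rwa [pvVal_digits, pvVal_digits] at this

theorem pv_exists_free (keys : List String) : ∃ j : Nat, j ≤ keys.length ∧ pvName (j : Int) ∉ keys := by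
  by_contra hc
  simp only [not_exists, not_and, not_not] at hc
  set l := (List.range (keys.length + 1)).map (fun j : Nat => pvName (j : Int)) with hl
  have hnd : l.Nodup := by
    refine List.Nodup.map_on ?_ (List.nodup_range)
    intro x hx y hy hxy
    exact pvName_inj x y hxy
  have hsub : l ⊆ keys := by
    intro x hx
    rw [hl, List.mem_map] at hx
    obtain ⟨j, hj, rfl⟩ := hx
    exact hc j (by simpa using Nat.lt_succ_iff.mp (List.mem_range.mp hj))
  have h1 : l.toFinset.card = l.length := List.toFinset_card_of_nodup hnd
  have h2 : l.toFinset ⊆ keys.toFinset := by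
    intro x hx; rw [List.mem_toFinset] at *; exact hsub hx
  have h3 := Finset.card_le_card h2
  have h4 := List.toFinset_card_le keys
  have h5 : l.length = keys.length + 1 := by simp [hl]
  omega

theorem pvGenLoop_spec (keys : List String) : ∀ (fuel : Nat) (a : Int),
    (∃ j : Nat, j < fuel ∧ pvName (a + j) ∉ keys) →
    ∃ m : Int, pvGenLoop keys fuel a = pvName m ∧ a ≤ m ∧ pvName m ∉ keys ∧
      ∀ x : Int, a ≤ x → x < m → pvName x ∈ keys := by
  intro fuel
  induction fuel with
  | zero => intro a ⟨j, hj, _⟩; omega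
  | succ fuel ih =>
    intro a ⟨j, hj, hfree⟩
    rw [pvGenLoop]
    by_cases hmem : ("Profile " ++ PySem.Int.toStr a) ∈ keys
    · rw [if_pos hmem]
      have hj0 : j ≠ 0 := by
        rintro rfl
        simp only [Int.natCast_zero, add_zero] at hfree
        exact hfree hmem
      obtain ⟨m, hres, hle, hfr, hall⟩ := ih (a + 1)
        ⟨j - 1, by omega, by
          have : a + 1 + ((j - 1 : Nat) : Int) = a + (j : Int) := by
            push_cast [Nat.cast_sub (by omega : 1 ≤ j)]; ring
          rwa [this]⟩
      refine ⟨m, hres, by omega, hfr, ?_⟩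
      intro x hx1 hx2
      rcases eq_or_lt_of_le hx1 with rfl | hlt
      · exact hmem
      · exact hall x (by omega) hx2
    · rw [if_neg hmem]
      exact ⟨a, rfl, le_refl _, hmem, by intro x h1 h2; omega⟩

theorem pv_names_eq (n : Nat) :
    (PySem.List.pyRange 0 ((n : Int) + 1) 1).map (fun i => "Profile " ++ PySem.Int.toStr i) =
      (List.range (n + 1)).map (fun j : Nat => pvName (j : Int)) := by
  rw [PySem.List.pyRange_one]
  have : ((n : Int) + 1 - 0).toNat = n + 1 := by omega
  rw [this, List.map_map]
  refine List.map_congr_left ?_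
  intro k _
  simp [pvName]

theorem pv_enumerate_append_singleton {α : Type} : ∀ (xs : List α) (x : α) (s : Int),
    PySem.List.enumerate (xs ++ [x]) s = PySem.List.enumerate xs s ++ [(s + xs.length, x)] := by
  intro xs
  induction xs with
  | nil => intro x s; simp [PySem.List.enumerate_cons, PySem.List.enumerate_nil]
  | cons y ys ih =>
    intro x s
    simp only [List.cons_append, PySem.List.enumerate_cons, ih, List.length_cons]
    have h2 : s + 1 + ((ys.length : Nat) : Int) = s + (((ys.length + 1 : Nat) : Int)) := by push_cast; ring
    rw [h2]

theorem pv_enum_map_range {α : Type} (f : Nat → α) : ∀ (N : Nat),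
    PySem.List.enumerate ((List.range N).map f) 0 =
      (List.range N).map (fun j : Nat => ((j : Int), f j)) := by
  intro N
  induction N with
  | zero => simp [PySem.List.enumerate_nil]
  | succ N ih =>
    rw [List.range_succ]
    simp only [List.map_append, List.map_cons, List.map_nil]
    rw [pv_enumerate_append_singleton, ih]
    simp

theorem pv_pairs_eq (n : Nat) :
    ((PySem.List.enumerate ((List.range (n + 1)).map (fun j : Nat => pvName (j : Int)))).map
        (fun p => (p.2, p.1))) =
      (List.range (n + 1)).map (fun j : Nat => (pvName (j : Int), (j : Int))) := by
  rw [pv_enum_map_range, List.map_map]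
  rfl

theorem pv_pairs_fst_nodup (n : Nat) :
    (((List.range (n + 1)).map (fun j : Nat => (pvName (j : Int), (j : Int)))).map Prod.fst).Nodup := by
  rw [List.map_map]
  refine List.Nodup.map_on ?_ List.nodup_range
  intro x _ y _ h
  exact pvName_inj x y h

theorem pv_index_items (n : Nat) :
    (PySem.Dict.ofList ((List.range (n + 1)).map (fun j : Nat => (pvName (j : Int), (j : Int))))).items =
      (List.range (n + 1)).map (fun j : Nat => (pvName (j : Int), (j : Int))) := by
  have := PySem.Dict.items_foldl_insert_fresh
    ((List.range (n + 1)).map (fun j : Nat => (pvName (j : Int), (j : Int))))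
    Prod.fst Prod.snd PySem.Dict.empty
    (by intro a _; exact PySem.Dict.contains_empty _)
    (pv_pairs_fst_nodup n)
  simpa using this

theorem pv_index_get_some (n : Nat) (key : String) (i : Int)
    (h : (PySem.Dict.ofList ((List.range (n + 1)).map (fun j : Nat => (pvName (j : Int), (j : Int))))).get?
      key = some i) : ∃ j : Nat, j < n + 1 ∧ i = (j : Int) ∧ key = pvName (j : Int) := by
  have := (PySem.Dict.get?_eq_some_iff_mem_items _ key i (PySem.Dict.nodup_keys_ofList _)).mp h
  rw [pv_index_items] at this
  obtain ⟨j, hj, hpair⟩ := List.mem_map.mp this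
  cases hpair
  exact ⟨j, List.mem_range.mp hj, rfl, rfl⟩

theorem pv_pyGet?_zero {α : Type} (xs : List α) : PySem.List.pyGet? xs 0 = xs.head? := by
  simp [PySem.List.pyGet?, PySem.List.pyIdx?]
  cases xs <;> simp

theorem pv_index_get_none (n : Nat) (key : String)
    (h : (PySem.Dict.ofList ((List.range (n + 1)).map (fun j : Nat => (pvName (j : Int), (j : Int))))).get?
      key = none) : ∀ j : Nat, j < n + 1 → key ≠ pvName (j : Int) := by
  rw [PySem.Dict.get?_eq_none_iff_not_mem_keys] at h
  intro j hj heq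
  apply h
  have hk : (PySem.Dict.ofList ((List.range (n + 1)).map (fun j : Nat => (pvName (j : Int), (j : Int))))).keys
      = ((PySem.Dict.ofList ((List.range (n + 1)).map (fun j : Nat => (pvName (j : Int), (j : Int))))).items).map (·.1) := rfl
  rw [hk, pv_index_items]
  subst heq
  exact List.mem_map.mpr ⟨(pvName (j : Int), (j : Int)),
    List.mem_map.mpr ⟨j, List.mem_range.mpr hj, rfl⟩, rfl⟩

theorem pv_mark (n : Nat) : ∀ (rest : List (String × Int)) (pr : List Bool), pr.length = n + 1 →
    (List.foldl (fun pr kv =>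
        match (PySem.Dict.ofList ((List.range (n + 1)).map (fun j : Nat => (pvName (j : Int), (j : Int))))).get? kv.1 with
        | some i => PySem.List.pySetD pr i true
        | none => pr) pr rest).length = n + 1 ∧
    ∀ j : Nat, j < n + 1 →
      (List.foldl (fun pr kv =>
        match (PySem.Dict.ofList ((List.range (n + 1)).map (fun j : Nat => (pvName (j : Int), (j : Int))))).get? kv.1 with
        | some i => PySem.List.pySetD pr i true
        | none => pr) pr rest).getD j false
        = (pr.getD j false || decide (pvName (j : Int) ∈ rest.map (·.1))) := by
  intro rest
  induction rest with
  | nil => intro pr h; exact ⟨h, by simp⟩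
  | cons kv rest ih =>
    intro pr hlen
    rw [List.foldl_cons]
    rcases hcase : (PySem.Dict.ofList ((List.range (n + 1)).map (fun j : Nat => (pvName (j : Int), (j : Int))))).get? kv.1 with _ | i
    · have hne : ∀ j : Nat, j < n + 1 → kv.1 ≠ pvName (j : Int) := pv_index_get_none n kv.1 hcase
      rw [show (match (none : Option Int) with
          | some i => PySem.List.pySetD pr i true
          | none => pr) = pr from rfl]
      obtain ⟨ih1, ih2⟩ := ih pr hlen
      refine ⟨ih1, ?_⟩
      intro j hj
      have hmem : (pvName (j : Int) ∈ kv.1 :: rest.map (·.1)) ↔ (pvName (j : Int) ∈ rest.map (·.1)) := by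
        constructor
        · intro h
          rcases List.mem_cons.mp h with h | h
          · exact absurd h.symm (hne j hj)
          · exact h
        · exact fun h => List.mem_cons.mpr (Or.inr h)
      rw [ih2 j hj, List.map_cons]
      congr 1
      exact (decide_eq_decide.mpr hmem).symm
    · obtain ⟨j0, hj0, rfl, hkey⟩ := pv_index_get_some n kv.1 i hcase
      rw [show (match (some ((j0 : Nat) : Int) : Option Int) with
          | some i => PySem.List.pySetD pr i true
          | none => pr) = PySem.List.pySetD pr ((j0 : Nat) : Int) true from rfl,
        PySem.List.pySetD_natCast]
      obtain ⟨ih1, ih2⟩ := ih (pr.set j0 true) (by simpa using hlen)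
      refine ⟨ih1, ?_⟩
      intro j hj
      rw [ih2 j hj]
      have hset : (pr.set j0 true).getD j false = if j0 = j then true else pr.getD j false := by
        rw [List.getD_eq_getElem?_getD, List.getElem?_set]
        by_cases h : j0 = j
        · subst h
          simp [hlen, hj0]
        · simp [h, List.getD_eq_getElem?_getD]
      rw [hset]
      by_cases h : j0 = j
      · subst h
        simp [hkey]
      · have hne2 : pvName (j : Int) ≠ kv.1 := by
          rw [hkey]
          intro hc
          exact h (pvName_inj j j0 hc).symm
        rw [if_neg h, List.map_cons]
        congr 1
        exact (decide_eq_decide.mpr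
          ⟨fun hc => List.mem_cons.mpr (Or.inr hc),
           fun hc => (List.mem_cons.mp hc).elim (fun h1 => absurd h1 hne2) id⟩)

theorem pv_filter_head (p : Nat → Bool) (m : Nat) (hp : p m = true) :
    ∀ (N s : Nat), s ≤ m → m < s + N → (∀ x, s ≤ x → x < m → p x = false) →
    ((List.range' s N).filter p).head? = some m := by
  intro N
  induction N with
  | zero => intro s h1 h2 _; omega
  | succ N ih =>
    intro s h1 h2 h4
    rw [List.range'_succ, List.filter_cons]
    rcases eq_or_lt_of_le h1 with rfl | hlt
    · simp [hp]
    · rw [h4 s (le_refl _) hlt]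
      simpa using ih (s + 1) (by omega) (by omega) (fun x hx1 hx2 => h4 x (by omega) hx2)

theorem pv_alt_char (dictionary : List (String × Int)) (m : Nat)
    (hm : m < dictionary.length + 1)
    (hfree : pvName (m : Int) ∉ dictionary.map (·.1))
    (hbusy : ∀ x : Nat, x < m → pvName (x : Int) ∈ dictionary.map (·.1)) :
    generate_profile_name_alt dictionary = pvName (m : Int) := by
  set n := dictionary.length with hn
  simp only [generate_profile_name_alt]
  simp only [← hn]
  rw [pv_names_eq n, pv_pairs_eq n]
  obtain ⟨hlen, hpresent⟩ := pv_mark n dictionary (List.replicate (n + 1) false) (by simp)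
  set present := dictionary.foldl (fun pr kv =>
      match (PySem.Dict.ofList ((List.range (n + 1)).map (fun j : Nat => (pvName (j : Int), (j : Int))))).get? kv.1 with
      | some i => PySem.List.pySetD pr i true
      | none => pr) (List.replicate (n + 1) false) with hpr
  have hpres : ∀ j : Nat, j < n + 1 → present.getD j false = decide (pvName (j : Int) ∈ dictionary.map (·.1)) := by
    intro j hj
    rw [hpr, hpresent j hj, List.getD_replicate _ hj, Bool.false_or]
  -- the free list
  rw [PySem.List.pyRange_one]
  have htn : ((n : Int) + 1 - 0).toNat = n + 1 := by omega
  rw [htn, List.filter_map]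
  have hfc : ((List.range (n + 1)).filter
        ((fun i => !(PySem.List.pyGetD present i false)) ∘ (fun k : Nat => (0 : Int) + k)))
      = (List.range (n + 1)).filter (fun j : Nat => !(decide (pvName (j : Int) ∈ dictionary.map (·.1)))) := by
    refine List.filter_congr ?_
    intro x hx
    simp only [Function.comp, zero_add, PySem.List.pyGetD_natCast]
    rw [hpres x (List.mem_range.mp hx)]
  rw [hfc]
  have hhead : ((List.range (n + 1)).filter
      (fun j : Nat => !(decide (pvName (j : Int) ∈ dictionary.map (·.1))))).head? = some m := by
    rw [List.range_eq_range']
    exact pv_filter_head _ m (by simp [hfree]) (n + 1) 0 (Nat.zero_le _) (by omega)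
      (fun x _ hx => by simp [hbusy x hx])
  rw [pv_pyGet?_zero, List.head?_map, hhead]
  simp only [Option.map_some]
  rw [show (0 : Int) + (m : Int) = (m : Int) by ring]
  rw [PySem.List.pyGetD_natCast]
  rw [List.getD_eq_getElem?_getD, List.getElem?_map, List.getElem?_range hm]
  rfl

theorem final_spec (dictionary : List (String × Int)) :
    generate_profile_name dictionary = generate_profile_name_alt dictionary := by
  obtain ⟨jf, hjf_le, hjf_free⟩ := pv_exists_free (dictionary.map (·.1))
  rw [List.length_map] at hjf_le
  obtain ⟨m, hres, hm0, hmfree, hmall⟩ := pvGenLoop_spec (dictionary.map (·.1))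
    (dictionary.length + 1) 0 ⟨jf, by omega, by simpa using hjf_free⟩
  have hmle : m ≤ (jf : Int) := by
    by_contra hc
    exact hjf_free (hmall _ (by omega) (by omega))
  have hmn : m = ((m.toNat : Nat) : Int) := by omega
  have : generate_profile_name dictionary = pvName m := hres
  rw [this, hmn]
  rw [pv_alt_char dictionary m.toNat (by omega) (by rw [← hmn]; exact hmfree)
    (fun x hx => hmall (x : Int) (by omega) (by omega))]

-- ===== VERDICT (by name: the statement is the Claim_ definition above) =====
theorem generate_profile_name_spec : Claim_equal_generate_profile_name := by
  intro dictionary _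
  exact final_spec dictionary
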